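-- pv_equiv track=rewrite | github.com/saurabh-pandey/EPIJudgeClone | epi_judge_python/int_as_array_increment.py | plus_one_v1
-- ===== SOURCE A (Python) =====
-- from typing import List
--
-- def plus_one_v1(A: List[int]) -> List[int]:
--     '''
--     My O(n) version
--     '''
--     res = []
--     carry = 1
--     for a in reversed(A):
--         if carry:
--             if a != 9:
--                 res.append(a + 1)
--                 carry = 0
--             else:
--                 res.append(0)
--                 carry = 1
--         else:
--             res.append(a)
--     if carry:
--         res.append(carry)
--     res.reverse()
--     return res
-- ===== SOURCE B (Python) =====
-- def plus_one_v1(A):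
--     '''
--     Recursive decomposition: increment the reversed list structurally,
--     stopping as soon as a non-9 digit absorbs the carry.
--     '''
--     def go(rev):
--         if not rev:
--             return [1]
--         if rev[0] == 9:
--             return [0] + go(rev[1:])
--         return [rev[0] + 1] + rev[1:]
--     return go(A[::-1])[::-1]
-- ===== Notes on version B (the rewrite author's own statement) =====
-- stated objective: simpler
-- what changed: Replaces A's imperative reversed-loop with a mutable carry flag and final append/reverse by a short structural recursion on the reversed list that stops the moment a non-9 digit absorbs the carry, leaving the rest of the list untouched.
import Mathlib
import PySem

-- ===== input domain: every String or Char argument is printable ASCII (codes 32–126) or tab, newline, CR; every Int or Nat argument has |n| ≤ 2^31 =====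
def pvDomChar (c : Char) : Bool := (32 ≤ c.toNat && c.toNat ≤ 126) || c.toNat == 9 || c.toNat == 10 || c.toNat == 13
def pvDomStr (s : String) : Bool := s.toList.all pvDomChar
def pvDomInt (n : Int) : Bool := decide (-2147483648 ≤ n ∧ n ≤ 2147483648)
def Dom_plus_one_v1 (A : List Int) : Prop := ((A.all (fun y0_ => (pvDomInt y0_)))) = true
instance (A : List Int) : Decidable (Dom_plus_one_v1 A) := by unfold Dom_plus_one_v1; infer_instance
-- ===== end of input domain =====

-- B: same return values as A; a shorter structural recursion on the reversed list
-- instead of A's carry-flag loop with final append and reverse. Neither mutates its argument.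

-- B: same return values as A; a shorter structural recursion on the reversed list
-- instead of A's carry-flag loop with final append and reverse. Neither mutates its argument.

-- ===== PORT A =====
-- loop body of A's for-loop (state = (res, carry))
def stepA (st : List Int × Int) (a : Int) : List Int × Int :=
  if st.2 ≠ 0 then
    if a ≠ 9 then (st.1 ++ [a + 1], 0) else (st.1 ++ [0], 1)
  else (st.1 ++ [a], st.2)

def plus_one_v1 (A : List Int) : List Int :=
  let st := A.reverse.foldl stepA ([], 1)
  let res := if st.2 ≠ 0 then st.1 ++ [st.2] else st.1
  res.reverse

-- ===== PORT B =====
def goAlt : List Int → List Int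
  | [] => [1]
  | a :: rest => if a = 9 then 0 :: goAlt rest else (a + 1) :: rest

def plus_one_v1_alt (A : List Int) : List Int := (goAlt A.reverse).reverse

-- ===== PRECONDITION & SPEC =====
def Spec_plus_one_v1 (A : List Int) (out : List Int) : Prop := out = plus_one_v1_alt A
instance (A : List Int) (out : List Int) : Decidable (Spec_plus_one_v1 A out) := by unfold Spec_plus_one_v1; infer_instance

-- ===== CLAIM (what is proved, stated in full; the proofs are below) =====
def Claim_equal_plus_one_v1 : Prop := ∀ (A : List Int), Dom_plus_one_v1 A → Spec_plus_one_v1 A (plus_one_v1 A)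

-- ===== LEMMAS AND PROOFS =====

-- once the carry is 0, A's loop just copies the remaining elements
lemma foldl_stepA_zero (l res : List Int) :
    l.foldl stepA (res, 0) = (res ++ l, 0) := by
  induction l generalizing res with
  | nil => simp
  | cons a l ih =>
    have hs : stepA (res, 0) a = (res ++ [a], 0) := by simp [stepA]
    rw [List.foldl_cons, hs, ih]; simp

-- A's loop from carry 1 followed by the final carry-append equals res ++ goAlt l
lemma foldl_stepA_one (l res : List Int) :
    (if (l.foldl stepA (res, 1)).2 ≠ 0
      then (l.foldl stepA (res, 1)).1 ++ [(l.foldl stepA (res, 1)).2]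
      else (l.foldl stepA (res, 1)).1) = res ++ goAlt l := by
  induction l generalizing res with
  | nil => simp [goAlt]
  | cons a l ih =>
    by_cases h : a = 9
    · have hs : stepA (res, 1) a = (res ++ [0], 1) := by simp [stepA, h]
      rw [List.foldl_cons, hs, ih]; simp [goAlt, h]
    · have hs : stepA (res, 1) a = (res ++ [a + 1], 0) := by simp [stepA, h]
      rw [List.foldl_cons, hs, foldl_stepA_zero]; simp [goAlt, h]

-- ===== VERDICT (by name: the statement is the Claim_ definition above) =====
theorem plus_one_v1_spec : Claim_equal_plus_one_v1 := by
  intro A _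
  show plus_one_v1 A = plus_one_v1_alt A
  show (if (A.reverse.foldl stepA ([], 1)).2 ≠ 0
          then (A.reverse.foldl stepA ([], 1)).1 ++ [(A.reverse.foldl stepA ([], 1)).2]
          else (A.reverse.foldl stepA ([], 1)).1).reverse = (goAlt A.reverse).reverse
  rw [foldl_stepA_one]
  simp
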